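-- pv_equiv track=rewrite | github.com/earsonlau/NaiveBayes-Adaboost | fofun.py | separatebyclass1
-- ===== SOURCE A (Python) =====
-- def separatebyclass1(dataset):#在寻找最佳特征的时候，需要把数据按类分一下
--     separated={}#创建一个字典
--     for i in range(len(dataset)):
--         vector=(dataset[i])
--         if vector[0] not in separated:
--             separated[vector[0]]=[]
--         separated[vector[0]].append(vector[1:])#字典的key是vector[0]，value是vector[1:]
--     return separated
-- ===== SOURCE B (Python) =====
-- def separatebyclass1(dataset):
--     # Different decomposition: first collect the distinct classes in first-appearance
--     # order, then build each group by one scan of the dataset per class.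
--     keys = list(dict.fromkeys(row[0] for row in dataset))
--     return {k: [row[1:] for row in dataset if row[0] == k] for k in keys}
-- ===== Notes on version B (the rewrite author's own statement) =====
-- stated objective: alternative
-- what changed: B first computes the ordered list of distinct classes (dict.fromkeys) and then builds each group by filtering the whole dataset once per class, instead of A's single accumulating pass that mutates a dict entry per row.
import Mathlib
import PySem

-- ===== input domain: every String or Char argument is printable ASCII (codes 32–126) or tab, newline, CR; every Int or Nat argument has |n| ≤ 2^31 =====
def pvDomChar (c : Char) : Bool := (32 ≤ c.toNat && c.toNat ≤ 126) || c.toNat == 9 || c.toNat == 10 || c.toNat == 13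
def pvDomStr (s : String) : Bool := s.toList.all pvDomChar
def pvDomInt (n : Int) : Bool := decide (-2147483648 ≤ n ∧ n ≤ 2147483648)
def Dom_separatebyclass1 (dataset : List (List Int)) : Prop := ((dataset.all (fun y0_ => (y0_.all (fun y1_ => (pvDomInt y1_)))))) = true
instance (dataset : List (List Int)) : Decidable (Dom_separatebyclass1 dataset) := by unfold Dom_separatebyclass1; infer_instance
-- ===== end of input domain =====

-- B builds the result per distinct class by repeated filtering instead of A's single
-- accumulating dict pass: an alternative decomposition, same return value.


-- ===== PORT A =====
-- for-loop over the rows building a dict: 'vector[0]' is v.headI (Pre_ keeps every row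
-- nonempty, where Python's vector[0] returns), 'vector[1:]' is v.drop 1 (exact),
-- 'separated[k].append(…)' is Dict.modify at the (present) key.
def separatebyclass1 (dataset : List (List Int)) : List (Int × List (List Int)) :=
  (dataset.foldl
    (fun sep v =>
      let key := v.headI
      let sep := if sep.contains key then sep else sep.insert key []
      sep.modify key [] (fun l => l ++ [v.drop 1]))
    (PySem.Dict.empty : PySem.Dict Int (List (List Int)))).items

-- ===== PORT B =====
-- 'list(dict.fromkeys(row[0] …))' is PySem.List.dedup; the dict comprehension is a map
-- over those keys, each group one filter-and-map pass over the dataset.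
def separatebyclass1_alt (dataset : List (List Int)) : List (Int × List (List Int)) :=
  (PySem.List.dedup (dataset.map (·.headI))).map
    (fun k => (k, (dataset.filter (fun r => r.headI == k)).map (·.drop 1)))

-- ===== PRECONDITION & SPEC =====
-- Pre_ excludes datasets containing an empty row, on which Python's 'vector[0]' raises IndexError (both A and B raise there).
def Pre_separatebyclass1 (dataset : List (List Int)) : Prop := ∀ v ∈ dataset, v ≠ []
instance (dataset : List (List Int)) : Decidable (Pre_separatebyclass1 dataset) := by unfold Pre_separatebyclass1; infer_instance
def pvWitness_separatebyclass1 : List (List Int) := [[1, 2], [2, 3], [1, 4]]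

def Spec_separatebyclass1 (dataset : List (List Int)) (out : List (Int × List (List Int))) : Prop := out = separatebyclass1_alt dataset
instance (dataset : List (List Int)) (out : List (Int × List (List Int))) : Decidable (Spec_separatebyclass1 dataset out) := by unfold Spec_separatebyclass1; infer_instance

-- ===== CLAIM (what is proved, stated in full; the proofs are below) =====
def Claim_equal_separatebyclass1 : Prop := ∀ (dataset : List (List Int)), Dom_separatebyclass1 dataset → Pre_separatebyclass1 dataset → Spec_separatebyclass1 dataset (separatebyclass1 dataset)

-- ===== LEMMAS AND PROOFS =====

-- A's per-row body collapses to a single Dict.modify: if the key is absent, inserting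
-- the empty group first and then appending is the same as modify with default [].
theorem pv_step_insert (d : PySem.Dict Int (List (List Int))) (k : Int) (x : List Int)
    (h : d.contains k = false) :
    (d.insert k []).modify k [] (fun l => l ++ [x]) = d.modify k [] (fun l => l ++ [x]) := by
  have hne : ∀ p ∈ d.items, p.1 ≠ k := by
    intro p hp hpk
    have : d.contains k = true := by
      rw [PySem.Dict.contains_iff_mem_keys]
      exact hpk ▸ PySem.Dict.mem_keys_of_mem_items d hp
    simp [this] at h
  have hget : d.get? k = none := by
    rw [PySem.Dict.get?_eq_none_iff_contains]; simpa using h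
  have e : (PySem.Dict.mk (d.items ++ [(k, ([] : List (List Int)))])) = d.insert k [] := by
    apply PySem.Dict.ext
    rw [PySem.Dict.items_insert_of_not_contains (h := h)]
  simp [PySem.Dict.modify, PySem.Dict.insert, h, PySem.Dict.getD_eq_get?_getD, hget]
  refine ⟨?_, ?_⟩
  · calc d.items.map (fun p => if p.1 = k then (k, (PySem.Dict.mk (d.items ++ [(k, ([] : List (List Int)))])).getD k [] ++ [x]) else p)
        = d.items.map id := List.map_congr_left (fun p hp => by simp [hne p hp])
      _ = d.items := List.map_id _
  · rw [e]; simp [PySem.Dict.get?_insert_self]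

-- A's fold, with the body collapsed, over the (key, rest) pairs.
theorem pv_fold_eq (dataset : List (List Int)) :
    dataset.foldl
      (fun sep v =>
        let key := v.headI
        let sep := if sep.contains key then sep else sep.insert key []
        sep.modify key [] (fun l => l ++ [v.drop 1]))
      (PySem.Dict.empty : PySem.Dict Int (List (List Int)))
    = (dataset.map (fun v => (v.headI, v.drop 1))).foldl
        (fun d p => d.modify p.1 [] (fun l => l ++ [p.2]))
        (PySem.Dict.empty : PySem.Dict Int (List (List Int))) := by
  rw [List.foldl_map]
  apply PySem.List.foldl_congr_mem
  intro d v _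
  by_cases h : d.contains v.headI
  · simp [h]
  · simp only [eq_false_of_ne_true h]
    exact pv_step_insert d v.headI (v.drop 1) (eq_false_of_ne_true h)

-- ===== VERDICT (by name: the statement is the Claim_ definition above) =====
theorem separatebyclass1_spec : Claim_equal_separatebyclass1 := by
  intro dataset _ _
  unfold Spec_separatebyclass1 separatebyclass1 separatebyclass1_alt
  rw [pv_fold_eq]
  set l := dataset.map (fun v => (v.headI, v.drop 1)) with hl
  set D := l.foldl (fun d p => d.modify p.1 [] (fun ls => ls ++ [p.2]))
      (PySem.Dict.empty : PySem.Dict Int (List (List Int))) with hD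
  have hnd : D.keys.Nodup := by
    rw [hD]
    exact PySem.Dict.nodup_keys_foldl_modify_key l (fun p => p.1) []
      (fun d p => fun ls => ls ++ [p.2]) _ PySem.Dict.nodup_keys_empty
  have hkeys : D.keys = PySem.List.dedup (dataset.map (·.headI)) := by
    rw [hD, PySem.Dict.keys_foldl_modify_key]
    simp [PySem.Dict.keys_empty, PySem.List.dedup_eq_ofList, hl, PySem.Set.update,
      PySem.Set.ofList_eq_foldl, Function.comp_def]
  have hget : ∀ k : Int, D.getD k [] =
      (dataset.filter (fun r => r.headI == k)).map (·.drop 1) := by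
    intro k
    rw [hD, PySem.Dict.getD_foldl_modify_append, hl, List.filter_map]
    simp [PySem.Dict.getD_empty, Function.comp_def, List.map_map]
  rw [PySem.Dict.items_eq_map_keys D hnd [], hkeys]
  exact List.map_congr_left (fun k _ => by rw [hget k])
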